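-- pv_equiv track=rewrite | github.com/Awesome-Austin/CodeWars | PattonsDecoder/main.py | _encrypt_one102
-- ===== SOURCE A (Python) =====
-- LETTERS = 'abcdefghijklmnopqrstuvwxyzABCDEFGHIJKLMNOPQRSTUVWXYZ0123456789.,? *'
--
-- def _encrypt_one102(c, n):
--     for i in range(n):
--         ind = LETTERS.find(c)
--         ind += 1
--         ind *= 2
--         ind -= 1
--         ind = ind % len(LETTERS)
--         c = LETTERS[ind]
--     return c
-- ===== SOURCE B (Python) =====
-- LETTERS = 'abcdefghijklmnopqrstuvwxyzABCDEFGHIJKLMNOPQRSTUVWXYZ0123456789.,? *'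
--
-- def _encrypt_one102(c, n):
--     # One affine step maps index x to (2*(x+1)-1) mod L, so after n steps
--     # the index is (2**n * (x0+1) - 1) mod L; computed with 3-argument pow.
--     if n <= 0:
--         return c
--     L = len(LETTERS)
--     return LETTERS[(pow(2, n, L) * (LETTERS.find(c) + 1) - 1) % L]
-- ===== Notes on version B (the rewrite author's own statement) =====
-- stated objective: faster
-- what changed: Replaces the n-iteration loop by the closed form index (2^n*(find(c)+1)-1) mod 67 computed with modular exponentiation pow(2,n,67), with n<=0 returning c unchanged.
import Mathlib
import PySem

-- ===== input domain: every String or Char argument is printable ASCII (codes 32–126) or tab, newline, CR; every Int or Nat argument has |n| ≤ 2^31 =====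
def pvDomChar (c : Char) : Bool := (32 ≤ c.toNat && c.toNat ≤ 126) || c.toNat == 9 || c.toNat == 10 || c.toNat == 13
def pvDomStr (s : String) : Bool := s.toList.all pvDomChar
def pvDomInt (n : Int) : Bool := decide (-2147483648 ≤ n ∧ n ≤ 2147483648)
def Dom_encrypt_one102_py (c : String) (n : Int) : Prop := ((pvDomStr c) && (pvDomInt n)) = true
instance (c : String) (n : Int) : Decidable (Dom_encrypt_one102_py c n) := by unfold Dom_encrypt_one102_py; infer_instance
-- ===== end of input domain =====

-- B replaces A's n-step loop by the closed-form index (2^n*(find(c)+1)-1) mod 67 via modular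
-- exponentiation (objective: faster, asymptotically).

def pvLetters : String := "abcdefghijklmnopqrstuvwxyzABCDEFGHIJKLMNOPQRSTUVWXYZ0123456789.,? *"

-- ===== PORT A =====
-- loop body of A: ind = LETTERS.find(c); ind += 1; ind *= 2; ind -= 1; ind %= len(LETTERS); c = LETTERS[ind]
-- (ind = _ % 67 is always in range, so Python's LETTERS[ind] never raises; the 'none' arm is unreachable)
def pvStepA (c : String) : String :=
  let ind := PySem.Str.find pvLetters c
  let ind := ind + 1
  let ind := ind * 2
  let ind := ind - 1
  let ind := PySem.Int.mod ind (PySem.Str.len pvLetters)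
  match PySem.Str.pyGet? pvLetters ind with
  | some ch => String.ofList [ch]
  | none => c

def encrypt_one102_py (c : String) (n : Int) : String :=
  (PySem.List.pyRange 0 n 1).foldl (fun c _ => pvStepA c) c

-- ===== PORT B =====
def encrypt_one102_py_alt (c : String) (n : Int) : String :=
  if n ≤ 0 then c
  else
    let L := PySem.Str.len pvLetters
    let ind := PySem.Int.mod (PySem.Int.powMod 2 n.toNat L * (PySem.Str.find pvLetters c + 1) - 1) L
    match PySem.Str.pyGet? pvLetters ind with
    | some ch => String.ofList [ch]
    | none => c

-- ===== PRECONDITION & SPEC =====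
def Spec_encrypt_one102_py (c : String) (n : Int) (out : String) : Prop := out = encrypt_one102_py_alt c n
instance (c : String) (n : Int) (out : String) : Decidable (Spec_encrypt_one102_py c n out) := by unfold Spec_encrypt_one102_py; infer_instance

-- ===== CLAIM (what is proved, stated in full; the proofs are below) =====
def Claim_equal_encrypt_one102_py : Prop := ∀ (c : String) (n : Int), Dom_encrypt_one102_py c n → Spec_encrypt_one102_py c n (encrypt_one102_py c n)

-- ===== LEMMAS AND PROOFS =====

-- the single-character string at index j of LETTERS (j in [0,67))
def pvLetterAt (j : Int) : String :=
  match PySem.Str.pyGet? pvLetters j with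
  | some ch => String.ofList [ch]
  | none => ""

theorem pvLen67 : PySem.Str.len pvLetters = 67 := by decide

theorem pvGetSome (j : Int) (h0 : 0 ≤ j) (h1 : j < 67) :
    ∃ ch, PySem.Str.pyGet? pvLetters j = some ch := by
  have hlen : pvLetters.toList.length = 67 := by decide
  have := PySem.List.pyGet?_eq_some_getElem (xs := pvLetters.toList) (i := j) h0 (by simpa [hlen])
  exact ⟨_, by simpa [PySem.Str.pyGet?] using this⟩

theorem pvMatch_eq_letterAt (j : Int) (h0 : 0 ≤ j) (h1 : j < 67) (d : String) :
    (match PySem.Str.pyGet? pvLetters j with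
      | some ch => String.ofList [ch]
      | none => d) = pvLetterAt j := by
  obtain ⟨ch, hch⟩ := pvGetSome j h0 h1
  have hch' : PySem.List.pyGet? pvLetters.toList j = some ch := by
    simpa [PySem.Str.pyGet?] using hch
  simp [pvLetterAt, PySem.Str.pyGet?, hch']

theorem pvFindLetterAt (j : Int) (h0 : 0 ≤ j) (h1 : j < 67) :
    PySem.Str.find pvLetters (pvLetterAt j) = j := by
  have hk : j.toNat < 67 := by omega
  set_option maxRecDepth 10000 in
  have h : ∀ k : Fin 67, PySem.Str.find pvLetters (pvLetterAt (k : Int)) = (k : Int) := by decide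
  have := h ⟨j.toNat, hk⟩
  simpa [Int.toNat_of_nonneg h0] using this

theorem pvStepA_eq (c : String) :
    pvStepA c = pvLetterAt (PySem.Int.mod (2 * (PySem.Str.find pvLetters c + 1) - 1) 67) := by
  have h0 : (0:Int) < 67 := by norm_num
  show (match PySem.Str.pyGet? pvLetters
      (PySem.Int.mod ((PySem.Str.find pvLetters c + 1) * 2 - 1) (PySem.Str.len pvLetters)) with
    | some ch => String.ofList [ch]
    | none => c) = _
  rw [pvLen67]
  have harg : (PySem.Str.find pvLetters c + 1) * 2 - 1 = 2 * (PySem.Str.find pvLetters c + 1) - 1 := by ring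
  rw [harg]
  exact pvMatch_eq_letterAt _ (PySem.Int.mod_nonneg _ h0) (PySem.Int.mod_lt _ h0) c

-- after m+1 iterations of A's loop body, the state is LETTERS[(2^(m+1)*(find(c)+1)-1) mod 67]
theorem pvIter (c : String) (m : Nat) :
    pvStepA^[m+1] c =
      pvLetterAt (PySem.Int.mod (2 ^ (m+1) * (PySem.Str.find pvLetters c + 1) - 1) 67) := by
  induction m with
  | zero => simpa using pvStepA_eq c
  | succ m ih =>
    have h0 : (0:Int) < 67 := by norm_num
    have hx0 := PySem.Int.mod_nonneg (2 ^ (m+1) * (PySem.Str.find pvLetters c + 1) - 1) h0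
    have hx1 := PySem.Int.mod_lt (2 ^ (m+1) * (PySem.Str.find pvLetters c + 1) - 1) h0
    rw [Function.iterate_succ_apply', ih, pvStepA_eq,
        pvFindLetterAt _ hx0 hx1]
    congr 1
    rw [PySem.Int.mod_eq_emod_of_pos h0, PySem.Int.mod_eq_emod_of_pos h0,
        PySem.Int.mod_eq_emod_of_pos h0]
    have hpow : (2:Int) ^ (m+1+1) * (PySem.Str.find pvLetters c + 1)
        = 2 * (2 ^ (m+1) * (PySem.Str.find pvLetters c + 1)) := by ring
    rw [hpow]
    generalize (2:Int) ^ (m+1) * (PySem.Str.find pvLetters c + 1) = t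
    omega

theorem pvFoldConst (l : List Int) (c : String) :
    l.foldl (fun c _ => pvStepA c) c = pvStepA^[l.length] c := by
  induction l generalizing c with
  | nil => rfl
  | cons x xs ih => simp [List.foldl_cons, ih, Function.iterate_succ_apply]

-- ===== VERDICT (by name: the statement is the Claim_ definition above) =====
theorem encrypt_one102_py_spec : Claim_equal_encrypt_one102_py := by
  intro c n _
  unfold Spec_encrypt_one102_py encrypt_one102_py encrypt_one102_py_alt
  by_cases hn : n ≤ 0
  · rw [PySem.List.pyRange_one_eq_nil (by omega)]
    simp [hn]
  · rw [if_neg hn, pvFoldConst]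
    have h0 : (0:Int) < 67 := by norm_num
    have hlen : (PySem.List.pyRange 0 n 1).length = n.toNat := by
      rw [PySem.List.length_pyRange_one]; omega
    obtain ⟨m, hm⟩ : ∃ m, n.toNat = m + 1 := ⟨n.toNat - 1, by omega⟩
    rw [hlen, hm, pvIter]
    show _ = (match PySem.Str.pyGet? pvLetters
        (PySem.Int.mod (PySem.Int.powMod 2 (m+1) (PySem.Str.len pvLetters) *
          (PySem.Str.find pvLetters c + 1) - 1) (PySem.Str.len pvLetters)) with
      | some ch => String.ofList [ch]
      | none => c)
    rw [pvLen67]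
    have harg : PySem.Int.powMod 2 (m+1) 67 * (PySem.Str.find pvLetters c + 1) - 1
        = (2 ^ (m+1) % 67) * (PySem.Str.find pvLetters c + 1) - 1 := by
      rw [PySem.Int.powMod, PySem.Int.mod_eq_emod_of_pos h0]
    rw [harg]
    have hmod : PySem.Int.mod ((2 ^ (m+1) % 67) * (PySem.Str.find pvLetters c + 1) - 1) 67
        = PySem.Int.mod (2 ^ (m+1) * (PySem.Str.find pvLetters c + 1) - 1) 67 := by
      rw [PySem.Int.mod_eq_emod_of_pos h0, PySem.Int.mod_eq_emod_of_pos h0]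
      have hbase : Int.ModEq 67 ((2:Int) ^ (m+1) % 67) (2 ^ (m+1)) :=
        Int.emod_emod_of_dvd _ dvd_rfl
      exact (hbase.mul_right _).sub_right 1
    rw [hmod]
    exact (pvMatch_eq_letterAt _ (PySem.Int.mod_nonneg _ h0) (PySem.Int.mod_lt _ h0) c).symm
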